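-- pv_equiv track=rewrite | github.com/baiwan-chenhao/rewrite | leetcode_gen_week3.py | solve
-- ===== SOURCE A (Python) =====
-- def solve(s: str, numFriends: int) -> str:
--     if numFriends == 1:
--         return s
--     n = len(s)
--     i, j = 0, 1
--     while j < n:
--         k = 0
--         while j + k < n and s[i + k] == s[j + k]:
--             k += 1
--         if j + k < n and s[i + k] < s[j + k]:
--             i, j = j, max(j + 1, i + k + 1)
--         else:
--             j += k + 1
--     return s[i: i + n - numFriends + 1]
-- ===== SOURCE B (Python) =====
-- def solve(s: str, numFriends: int) -> str:
--     if numFriends == 1: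
--         return s
--     L = len(s) - numFriends + 1
--     if L <= 0:
--         return ""
--     best = ""
--     for i in range(len(s)):
--         w = s[i:i + L]
--         if best < w:
--             best = w
--     return best
-- ===== Notes on version B (the rewrite author's own statement) =====
-- stated objective: simpler
-- what changed: Replaced A's Duval-style two-pointer maximal-suffix scan (with its inner common-prefix loop and index jumps) by a direct running-maximum over all fixed-length windows s[i:i+L], plus an explicit empty answer when L <= 0.
-- intended difference: When numFriends >= len(s)+2 (more pieces than characters) and the lexicographically maximal suffix starts before numFriends-len(s)-1, A's slice s[i:i+len(s)-numFriends+1] has a negative stop index and wraps around, returning a nonempty junk substring (e.g. solve('ba',4)='b'); B returns '' there, the intended value since no split into that many nonempty parts exists. — e.g. on solve("ba", 4): A returns "b", B returns ""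
import Mathlib
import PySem

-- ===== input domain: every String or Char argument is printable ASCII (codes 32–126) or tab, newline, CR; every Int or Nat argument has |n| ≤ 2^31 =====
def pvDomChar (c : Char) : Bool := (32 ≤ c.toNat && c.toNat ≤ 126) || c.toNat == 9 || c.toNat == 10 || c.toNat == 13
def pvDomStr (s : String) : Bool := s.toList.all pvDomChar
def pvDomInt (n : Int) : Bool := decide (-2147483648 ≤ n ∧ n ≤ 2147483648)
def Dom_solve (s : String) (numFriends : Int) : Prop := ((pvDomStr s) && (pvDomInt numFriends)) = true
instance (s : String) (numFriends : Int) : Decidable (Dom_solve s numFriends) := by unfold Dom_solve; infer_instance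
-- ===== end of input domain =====

-- B replaces A's two-pointer maximal-suffix scan by a direct maximum over all fixed-length
-- windows (simpler, not faster); where A's slice stop index goes negative and wraps
-- (numFriends ≥ len(s)+2), B returns "" instead — see D_solve.

-- ===== PORT A =====
-- inner 'while j + k < n and s[i+k] == s[j+k]: k += 1' (indices are always in range there,
-- so pyGetD is exact; Python's 1-char-string comparison is Char comparison by code point)
def lceA (l : List Char) (n i j k : Int) : Int :=
  if h : j + k < n ∧ PySem.List.pyGetD l (i + k) ' ' = PySem.List.pyGetD l (j + k) ' ' then
    lceA l n i j (k + 1)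
  else k
termination_by (n - (j + k)).toNat
decreasing_by have := h.1; omega

-- termination fact for loopA (cited in its decreasing_by)
theorem le_lceA (l : List Char) (n i j k : Int) : k ≤ lceA l n i j k := by
  fun_induction lceA <;> omega

-- outer 'while j < n' loop; returns the final i
def loopA (l : List Char) (n i j : Int) : Int :=
  if hj : j < n then
    let k := lceA l n i j 0
    if j + k < n ∧ PySem.List.pyGetD l (i + k) ' ' < PySem.List.pyGetD l (j + k) ' ' then
      loopA l n j (max (j + 1) (i + k + 1))
    else
      loopA l n i (j + k + 1)
  else i
termination_by (n - j).toNat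
decreasing_by
  · omega
  · have := le_lceA l n i j 0; omega

def solve (s : String) (numFriends : Int) : String :=
  if numFriends == 1 then s
  else
    let n : Int := PySem.Str.len s
    let i := loopA s.toList n 0 1
    PySem.Str.slice s (some i) (some (i + n - numFriends + 1))

-- ===== PORT B =====
-- Python's '<' on strings: lexicographic comparison by code point (exact on the ASCII domain)
def pyStrLt : List Char → List Char → Bool
  | _, [] => false
  | [], _ :: _ => true
  | a :: as, b :: bs => if a < b then true else if b < a then false else pyStrLt as bs

def solve_alt (s : String) (numFriends : Int) : String :=
  if numFriends == 1 then s
  else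
    let L : Int := PySem.Str.len s - numFriends + 1
    if L ≤ 0 then ""
    else
      String.ofList ((PySem.List.pyRange 0 (PySem.Str.len s) 1).foldl
        (fun best i =>
          let w := PySem.List.slice s.toList (some i) (some (i + L))
          if pyStrLt best w then w else best) [])

-- ===== PRECONDITION & SPEC =====
-- When numFriends ≥ len(s)+2 and the lexicographically maximal suffix of s starts before
-- numFriends - len(s) - 1, A's slice s[i : i+len(s)-numFriends+1] has a negative stop index and
-- wraps around, returning a nonempty junk substring; B returns "" (no split into that many
-- nonempty parts exists), which is the intended value.
def D_solve (s : String) (numFriends : Int) : Prop :=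
  1 ≤ s.toList.length ∧ (s.toList.length : Int) + 2 ≤ numFriends ∧
  numFriends ≤ 2 * (s.toList.length : Int) ∧
  ∃ t : Nat, t < s.toList.length ∧ (t : Int) < numFriends - (s.toList.length : Int) - 1 ∧
    ∀ u : Nat, u < s.toList.length → s.toList.drop u ≤ s.toList.drop t

instance (s : String) (numFriends : Int) : Decidable (D_solve s numFriends) := by
  unfold D_solve; infer_instance

def Spec_solve (s : String) (numFriends : Int) (out : String) : Prop :=
  ¬ D_solve s numFriends → out = solve_alt s numFriends
instance (s : String) (numFriends : Int) (out : String) : Decidable (Spec_solve s numFriends out) := by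
  unfold Spec_solve; infer_instance

def pvDiffWitness_solve : String × Int := ("ba", 4)
def pvDiffWitnessOut_solve : String × String := ("b", "")

-- ===== CLAIM (what is proved, stated in full; the proofs are below) =====
def Claim_unchanged_solve : Prop := ∀ (s : String) (numFriends : Int), Dom_solve s numFriends → Spec_solve s numFriends (solve s numFriends)
def Claim_changed_solve : Prop := Dom_solve (pvDiffWitness_solve.1) (pvDiffWitness_solve.2) ∧ D_solve (pvDiffWitness_solve.1) (pvDiffWitness_solve.2) ∧ solve (pvDiffWitness_solve.1) (pvDiffWitness_solve.2) = pvDiffWitnessOut_solve.1 ∧ solve_alt (pvDiffWitness_solve.1) (pvDiffWitness_solve.2) = pvDiffWitnessOut_solve.2 ∧ pvDiffWitnessOut_solve.1 ≠ pvDiffWitnessOut_solve.2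
def Claim_exact_solve : Prop := ∀ (s : String) (numFriends : Int), Dom_solve s numFriends → D_solve s numFriends → solve s numFriends ≠ solve_alt s numFriends

-- ===== LEMMAS AND PROOFS =====

-- basic facts about pyStrLt (Python's lexicographic '<' on strings)

theorem ltL_nil (a : List Char) : pyStrLt a [] = false := by cases a <;> rfl

theorem ltL_irrefl (a : List Char) : pyStrLt a a = false := by
  induction a with
  | nil => rfl
  | cons x xs ih => simp [pyStrLt, ih]

theorem ltL_cons_self (x : Char) (u v : List Char) :
    pyStrLt (x :: u) (x :: v) = pyStrLt u v := by simp [pyStrLt]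

theorem ltL_cons_lt {x y : Char} (h : x < y) (u v : List Char) :
    pyStrLt (x :: u) (y :: v) = true := by simp [pyStrLt, h]

theorem ltL_trans : ∀ {a b c : List Char}, pyStrLt a b = true → pyStrLt b c = true →
    pyStrLt a c = true := by
  intro a
  induction a with
  | nil =>
    intro b c h1 h2
    cases b with
    | nil => simp [pyStrLt] at h1
    | cons y ys =>
      cases c with
      | nil => rw [ltL_nil] at h2; exact absurd h2 (by simp)
      | cons z zs => rfl
  | cons x xs ih =>
    intro b c h1 h2
    cases b with
    | nil => rw [ltL_nil] at h1; exact absurd h1 (by simp)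
    | cons y ys =>
      cases c with
      | nil => rw [ltL_nil] at h2; exact absurd h2 (by simp)
      | cons z zs =>
        rcases lt_trichotomy x y with hxy | hxy | hxy
        · rcases lt_trichotomy y z with hyz | hyz | hyz
          · exact ltL_cons_lt (lt_trans hxy hyz) _ _
          · subst hyz; exact ltL_cons_lt hxy _ _
          · exfalso; simp [pyStrLt, hyz, lt_asymm hyz] at h2
        · subst hxy
          rcases lt_trichotomy x z with hyz | hyz | hyz
          · exact ltL_cons_lt hyz _ _
          · subst hyz
            rw [ltL_cons_self] at h1 h2 ⊢
            exact ih h1 h2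
          · exfalso; simp [pyStrLt, hyz, lt_asymm hyz] at h2
        · exfalso; simp [pyStrLt, hxy, lt_asymm hxy] at h1

theorem ltL_eq_or_gt : ∀ {a b : List Char}, pyStrLt a b = false →
    a = b ∨ pyStrLt b a = true := by
  intro a
  induction a with
  | nil =>
    intro b h
    cases b with
    | nil => exact Or.inl rfl
    | cons y ys => simp [pyStrLt] at h
  | cons x xs ih =>
    intro b h
    cases b with
    | nil => exact Or.inr rfl
    | cons y ys =>
      rcases lt_trichotomy x y with hxy | hxy | hxy
      · rw [ltL_cons_lt hxy] at h; exact absurd h (by simp)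
      · subst hxy
        rw [ltL_cons_self] at h
        rcases ih h with h' | h'
        · exact Or.inl (by rw [h'])
        · exact Or.inr (by rw [ltL_cons_self]; exact h')
      · exact Or.inr (ltL_cons_lt hxy _ _)

theorem ltL_take : ∀ (m : Nat) (a b : List Char),
    pyStrLt (a.take m) (b.take m) = true → pyStrLt a b = true := by
  intro m
  induction m with
  | zero => intro a b h; simp [pyStrLt] at h
  | succ m ih =>
    intro a b h
    cases a with
    | nil =>
      cases b with
      | nil => simp [pyStrLt] at h
      | cons y ys => rfl
    | cons x xs =>
      cases b with
      | nil => simp [ltL_nil] at h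
      | cons y ys =>
        simp only [List.take_succ_cons] at h
        rcases lt_trichotomy x y with hxy | hxy | hxy
        · exact ltL_cons_lt hxy _ _
        · subst hxy
          rw [ltL_cons_self] at h ⊢
          exact ih _ _ h
        · simp [pyStrLt, hxy, lt_asymm hxy] at h

-- bridge: pyStrLt is Mathlib's lexicographic '<' on List Char (used by D_solve)
theorem ltL_iff_lex : ∀ (a b : List Char), pyStrLt a b = true ↔ List.Lex (· < ·) a b := by
  intro a
  induction a with
  | nil =>
    intro b
    cases b with
    | nil => simp [pyStrLt]
    | cons y ys => simp [pyStrLt]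
  | cons x xs ih =>
    intro b
    cases b with
    | nil => simp [ltL_nil]
    | cons y ys =>
      rcases lt_trichotomy x y with hxy | hxy | hxy
      · simp [ltL_cons_lt hxy]; exact List.Lex.rel hxy
      · subst hxy
        rw [ltL_cons_self]
        constructor
        · intro h; exact List.Lex.cons ((ih ys).mp h)
        · intro h
          cases h with
          | rel h' => exact absurd h' (lt_irrefl _)
          | cons h' => exact (ih ys).mpr h'
      · constructor
        · intro h; simp [pyStrLt, hxy, lt_asymm hxy] at h
        · intro h
          cases h with
          | rel h' => exact absurd h' (lt_asymm hxy)
          | cons h' => exact absurd rfl (ne_of_gt hxy)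

theorem ltL_iff_lt (a b : List Char) : pyStrLt a b = true ↔ a < b := by
  rw [show ((a < b) ↔ a.lt b) from Iff.rfl, List.lt_iff_lex_lt]
  exact ltL_iff_lex a b

theorem ltL_false_iff_le (a b : List Char) : pyStrLt a b = false ↔ b ≤ a := by
  rw [← not_lt, ← ltL_iff_lt]
  cases h : pyStrLt a b
  · simp
  · simp

-- suffix-comparison machinery

theorem getD_cons_drop {l : List Char} {p : Nat} (h : p < l.length) :
    l.drop p = l.getD p ' ' :: l.drop (p + 1) := by
  rw [List.drop_eq_getElem_cons h, List.getD_eq_getElem _ _ h]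

theorem ltL_drop_of_match (l : List Char) (p q k : Nat)
    (hpk : p + k ≤ l.length) (hqk : q + k ≤ l.length)
    (hm : ∀ r, r < k → l.getD (p + r) ' ' = l.getD (q + r) ' ')
    (H : pyStrLt (l.drop (p + k)) (l.drop (q + k)) = true) :
    ∀ m, m ≤ k → pyStrLt (l.drop (p + m)) (l.drop (q + m)) = true := by
  suffices aux : ∀ (d m : Nat), m ≤ k → k - m = d →
      pyStrLt (l.drop (p + m)) (l.drop (q + m)) = true by
    intro m hm'; exact aux (k - m) m hm' rfl
  intro d
  induction d with
  | zero =>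
    intro m h1 h2
    have : m = k := by omega
    subst this; exact H
  | succ d ihd =>
    intro m h1 h2
    have hmk : m < k := by omega
    have hp : p + m < l.length := by omega
    have hq : q + m < l.length := by omega
    rw [getD_cons_drop hp, getD_cons_drop hq, hm m hmk, ltL_cons_self]
    have := ihd (m + 1) (by omega) (by omega)
    have e1 : p + (m + 1) = p + m + 1 := by omega
    have e2 : q + (m + 1) = q + m + 1 := by omega
    rwa [e1, e2] at this

theorem exists_best (l : List Char) : ∀ m, 0 < m → m ≤ l.length →
    ∃ t, t < m ∧ ∀ u, u < m → pyStrLt (l.drop t) (l.drop u) = false := by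
  intro m
  induction m with
  | zero => omega
  | succ m ih =>
    intro _ hm
    by_cases hm0 : m = 0
    · subst hm0
      exact ⟨0, by omega, fun u hu => by
        have : u = 0 := by omega
        subst this; exact ltL_irrefl _⟩
    · obtain ⟨t, ht, hbest⟩ := ih (by omega) (by omega)
      by_cases hc : pyStrLt (l.drop t) (l.drop m) = true
      · refine ⟨m, by omega, fun u hu => ?_⟩
        rcases Nat.lt_succ_iff_lt_or_eq.mp hu with hu | hu
        · cases hcon : pyStrLt (l.drop m) (l.drop u) with
          | false => rfl
          | true =>
            exfalso
            rcases ltL_eq_or_gt (hbest u hu) with he | hgt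
            · rw [← he] at hcon
              have := ltL_trans hc hcon
              rw [ltL_irrefl] at this; simp at this
            · have := ltL_trans (ltL_trans hc hcon) hgt
              rw [ltL_irrefl] at this; simp at this
        · subst hu; exact ltL_irrefl _
      · refine ⟨t, by omega, fun u hu => ?_⟩
        rcases Nat.lt_succ_iff_lt_or_eq.mp hu with hu | hu
        · exact hbest u hu
        · subst hu; simpa using hc

theorem pyGetD_getD (l : List Char) (x : Int) (h1 : 0 ≤ x) (h2 : x < (l.length : Int)) :
    PySem.List.pyGetD l x ' ' = l.getD x.toNat ' ' := by
  rw [PySem.List.pyGetD_eq_getElem l ' ' h1 h2, List.getD_eq_getElem _ _ (by omega)]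

-- specification of the inner while loop (longest common extension)
theorem lceA_spec (l : List Char) (i j : Int) :
    ∀ (d : Nat) (k : Int), 0 ≤ k → j + k ≤ (l.length : Int) →
    (((l.length : Int) - (j + k)).toNat = d) →
    k ≤ lceA l (l.length : Int) i j k ∧
    j + lceA l (l.length : Int) i j k ≤ (l.length : Int) ∧
    (∀ r : Int, k ≤ r → r < lceA l (l.length : Int) i j k →
      PySem.List.pyGetD l (i + r) ' ' = PySem.List.pyGetD l (j + r) ' ') ∧
    (j + lceA l (l.length : Int) i j k = (l.length : Int) ∨
      PySem.List.pyGetD l (i + lceA l (l.length : Int) i j k) ' ' ≠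
        PySem.List.pyGetD l (j + lceA l (l.length : Int) i j k) ' ') := by
  intro d
  induction d with
  | zero =>
    intro k hk hjk hd
    rw [lceA, dif_neg (by rintro ⟨h1, -⟩; omega)]
    exact ⟨le_refl _, hjk, fun r h1 h2 => absurd h1 (by omega), Or.inl (by omega)⟩
  | succ d ihd =>
    intro k hk hjk hd
    rw [lceA]
    by_cases hc : j + k < (l.length : Int) ∧
        PySem.List.pyGetD l (i + k) ' ' = PySem.List.pyGetD l (j + k) ' '
    · rw [dif_pos hc]
      obtain ⟨ha, hb, hm, ht⟩ := ihd (k + 1) (by omega) (by omega) (by omega)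
      refine ⟨by omega, hb, ?_, ht⟩
      intro r hr1 hr2
      by_cases hr : r = k
      · subst hr; exact hc.2
      · exact hm r (by omega) hr2
    · rw [dif_neg hc]
      refine ⟨le_refl _, hjk, fun r h1 h2 => absurd h1 (by omega), ?_⟩
      by_cases h1 : j + k = (l.length : Int)
      · exact Or.inl h1
      · exact Or.inr (fun heq => hc ⟨by omega, heq⟩)

-- the outer loop returns the start of the lexicographically maximal suffix
theorem loopA_max (l : List Char) :
    ∀ (d : Nat) (i j : Int), (((l.length : Int) - j).toNat = d) →
    0 ≤ i → i < j → i < (l.length : Int) →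
    (∀ t : Nat, t < l.length →
      (∀ u : Nat, u < l.length → pyStrLt (l.drop t) (l.drop u) = false) →
      ((t : Int) = i ∨ j ≤ (t : Int))) →
    0 ≤ loopA l (l.length : Int) i j ∧ loopA l (l.length : Int) i j < (l.length : Int) ∧
    ∀ u : Nat, u < l.length →
      pyStrLt (l.drop (loopA l (l.length : Int) i j).toNat) (l.drop u) = false := by
  intro d
  induction d using Nat.strong_induction_on with
  | _ d ihd =>
  intro i j hd h0 hij hin hinv
  rw [loopA]
  by_cases hj : j < (l.length : Int)
  case neg =>
    rw [dif_neg hj]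
    have hl0 : 0 < l.length := by omega
    obtain ⟨t, ht, hbest⟩ := exists_best l l.length hl0 (le_refl _)
    have hti : (t : Int) = i := by
      rcases hinv t ht hbest with h | h
      · exact h
      · exfalso; have : (t : Int) < (l.length : Int) := by exact_mod_cast ht
        omega
    refine ⟨h0, by omega, ?_⟩
    intro u hu
    have : i.toNat = t := by omega
    rw [this]; exact hbest u hu
  case pos =>
    rw [dif_pos hj]
    obtain ⟨hk0, hkn, hmatch, hterm⟩ :=
      lceA_spec l i j (((l.length : Int) - (j + 0)).toNat) 0 (le_refl 0) (by omega) rfl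
    set K := lceA l (l.length : Int) i j 0 with hK
    have hiK : i + K < (l.length : Int) := by omega
    have hmatchN : ∀ r : Nat, r < K.toNat →
        l.getD (i.toNat + r) ' ' = l.getD (j.toNat + r) ' ' := by
      intro r hr
      have h1 := hmatch (r : Int) (by omega) (by omega)
      rw [pyGetD_getD l _ (by omega) (by omega), pyGetD_getD l _ (by omega) (by omega)] at h1
      have e1 : (i + (r : Int)).toNat = i.toNat + r := by omega
      have e2 : (j + (r : Int)).toNat = j.toNat + r := by omega
      rwa [e1, e2] at h1
    by_cases hc : j + K < (l.length : Int) ∧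
        PySem.List.pyGetD l (i + K) ' ' < PySem.List.pyGetD l (j + K) ' '
    · rw [if_pos hc]
      -- branch 'i, j = j, max(j+1, i+k+1)'
      have hlt : l.getD (i.toNat + K.toNat) ' ' < l.getD (j.toNat + K.toNat) ' ' := by
        have h2 := hc.2
        rw [pyGetD_getD l _ (by omega) (by omega), pyGetD_getD l _ (by omega) (by omega)] at h2
        have e1 : (i + K).toNat = i.toNat + K.toNat := by omega
        have e2 : (j + K).toNat = j.toNat + K.toNat := by omega
        rwa [e1, e2] at h2
      have H : pyStrLt (l.drop (i.toNat + K.toNat)) (l.drop (j.toNat + K.toNat)) = true := by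
        rw [getD_cons_drop (by omega : i.toNat + K.toNat < l.length),
            getD_cons_drop (by omega : j.toNat + K.toNat < l.length)]
        exact ltL_cons_lt hlt _ _
      have hdrop := ltL_drop_of_match l i.toNat j.toNat K.toNat (by omega) (by omega) hmatchN H
      apply ihd (((l.length : Int) - max (j + 1) (i + K + 1)).toNat) (by omega) j _ rfl
        (by omega) (by omega) hj
      intro t ht hmax
      rcases hinv t ht hmax with hti | htj
      · exfalso
        have h00 := hdrop 0 (by omega)
        simp only [Nat.add_zero] at h00
        have hcon := hmax j.toNat (by omega)
        have : t = i.toNat := by omega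
        rw [this] at hcon
        rw [hcon] at h00; exact absurd h00 (by simp)
      · by_cases hteq : (t : Int) = j
        · exact Or.inl hteq
        · right
          by_contra hlt'
          rw [not_le] at hlt'
          have htik : (t : Int) ≤ i + K := by omega
          have htj' : j < (t : Int) := by omega
          set m := t - i.toNat with hm
          have hmle : m ≤ K.toNat := by omega
          have h2 := hdrop m hmle
          have e1 : i.toNat + m = t := by omega
          rw [e1] at h2
          have hcon := hmax (j.toNat + m) (by omega)
          rw [hcon] at h2; exact absurd h2 (by simp)
    · rw [if_neg hc]
      -- branch 'j += k + 1'
      apply ihd (((l.length : Int) - (j + K + 1)).toNat) (by omega) i _ rfl h0 (by omega) hin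
      intro t ht hmax
      rcases hinv t ht hmax with hti | htj
      · exact Or.inl hti
      · right
        by_contra hlt'
        rw [not_le] at hlt'
        have H' : pyStrLt (l.drop (j.toNat + K.toNat)) (l.drop (i.toNat + K.toNat)) = true := by
          by_cases hjkn : j + K = (l.length : Int)
          · have : l.length ≤ j.toNat + K.toNat := by omega
            rw [List.drop_eq_nil_of_le this,
                getD_cons_drop (by omega : i.toNat + K.toNat < l.length)]
            rfl
          · have hjk' : j + K < (l.length : Int) := by omega
            have hne : PySem.List.pyGetD l (i + K) ' ' ≠ PySem.List.pyGetD l (j + K) ' ' := by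
              rcases hterm with h | h
              · exact absurd h hjkn
              · exact h
            have hnlt : ¬ PySem.List.pyGetD l (i + K) ' ' < PySem.List.pyGetD l (j + K) ' ' :=
              fun hcl => hc ⟨hjk', hcl⟩
            have hgt : PySem.List.pyGetD l (j + K) ' ' < PySem.List.pyGetD l (i + K) ' ' :=
              lt_of_le_of_ne (not_lt.mp hnlt) (Ne.symm hne)
            rw [pyGetD_getD l _ (by omega) (by omega), pyGetD_getD l _ (by omega) (by omega)] at hgt
            have e1 : (i + K).toNat = i.toNat + K.toNat := by omega
            have e2 : (j + K).toNat = j.toNat + K.toNat := by omega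
            rw [e1, e2] at hgt
            rw [getD_cons_drop (by omega : j.toNat + K.toNat < l.length),
                getD_cons_drop (by omega : i.toNat + K.toNat < l.length)]
            exact ltL_cons_lt hgt _ _
        have hmatchN' : ∀ r : Nat, r < K.toNat →
            l.getD (j.toNat + r) ' ' = l.getD (i.toNat + r) ' ' :=
          fun r hr => (hmatchN r hr).symm
        have hdrop := ltL_drop_of_match l j.toNat i.toNat K.toNat (by omega) (by omega) hmatchN' H'
        set m := t - j.toNat with hm
        have hmle : m ≤ K.toNat := by omega
        have h2 := hdrop m hmle
        have e1 : j.toNat + m = t := by omega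
        rw [e1] at h2
        have hcon := hmax (i.toNat + m) (by omega)
        rw [hcon] at h2; exact absurd h2 (by simp)

theorem geL_trans {a b c : List Char} (h1 : pyStrLt a b = false) (h2 : pyStrLt b c = false) :
    pyStrLt a c = false := by
  cases hac : pyStrLt a c with
  | false => rfl
  | true =>
    exfalso
    rcases ltL_eq_or_gt h2 with he | hgt
    · rw [← he] at hac; rw [hac] at h1; exact absurd h1 (by simp)
    · have := ltL_trans hac hgt
      rw [this] at h1; exact absurd h1 (by simp)

-- the running-max loop of B, generically over the window function
theorem foldl_best (win : Int → List Char) : ∀ (xs : List Int) (b0 : List Char),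
    (xs.foldl (fun best i => if pyStrLt best (win i) then win i else best) b0 = b0 ∨
      ∃ t ∈ xs, xs.foldl (fun best i => if pyStrLt best (win i) then win i else best) b0 = win t) ∧
    pyStrLt (xs.foldl (fun best i => if pyStrLt best (win i) then win i else best) b0) b0 = false ∧
    ∀ t ∈ xs, pyStrLt (xs.foldl (fun best i => if pyStrLt best (win i) then win i else best) b0)
      (win t) = false := by
  intro xs
  induction xs with
  | nil => exact fun b0 => ⟨Or.inl rfl, ltL_irrefl _, by simp⟩
  | cons x xs ih =>
    intro b0
    simp only [List.foldl_cons]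
    obtain ⟨hmem, hge, hall⟩ := ih (if pyStrLt b0 (win x) then win x else b0)
    have hb1ge0 : pyStrLt (if pyStrLt b0 (win x) then win x else b0) b0 = false := by
      by_cases h : pyStrLt b0 (win x) = true
      · rw [if_pos h]
        cases hcon : pyStrLt (win x) b0 with
        | false => rfl
        | true => have := ltL_trans h hcon; rw [ltL_irrefl] at this; exact absurd this (by simp)
      · rw [if_neg h]; exact ltL_irrefl _
    have hb1gex : pyStrLt (if pyStrLt b0 (win x) then win x else b0) (win x) = false := by
      by_cases h : pyStrLt b0 (win x) = true
      · rw [if_pos h]; exact ltL_irrefl _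
      · rw [if_neg h]; simpa using h
    refine ⟨?_, geL_trans hge hb1ge0, ?_⟩
    · rcases hmem with h | ⟨t, ht, h⟩
      · by_cases hx : pyStrLt b0 (win x) = true
        · exact Or.inr ⟨x, List.mem_cons_self, by rw [h, if_pos hx]⟩
        · exact Or.inl (by rw [h, if_neg hx])
      · exact Or.inr ⟨t, List.mem_cons_of_mem _ ht, h⟩
    · intro t ht
      rcases List.mem_cons.mp ht with rfl | ht'
      · exact geL_trans hge hb1gex
      · exact hall t ht'

theorem slice_nil_of_clamp (l : List Char) (a b : Int)
    (h : PySem.List.clampIdx l.length b ≤ PySem.List.clampIdx l.length a) :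
    PySem.List.slice l (some a) (some b) = [] := by
  apply List.eq_nil_of_length_eq_zero
  rw [PySem.List.length_slice]; omega

theorem clampIdx_eval (n : Nat) (i : Int) :
    PySem.List.clampIdx n i =
      if i < 0 then (if (n : Int) + i < 0 then 0 else ((n : Int) + i).toNat) else min i.toNat n := by
  rfl

-- A = B on every input outside D_solve
theorem solve_eq (s : String) (f : Int) (hD : ¬ D_solve s f) : solve s f = solve_alt s f := by
  by_cases hf1 : f = 1
  · subst hf1; simp [solve, solve_alt]
  · have hf : (f == 1) = false := beq_eq_false_iff_ne.mpr hf1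
    simp only [solve, solve_alt, hf, Bool.false_eq_true, if_false, PySem.Str.len_eq,
      PySem.Str.slice, PySem.Chars.slice]
    set l := s.toList with hl
    set ist := loopA l (l.length : Int) 0 1 with hist
    by_cases hn0 : l.length = 0
    · -- empty string: both sides are ""
      have hsl : PySem.List.slice l (some ist) (some (ist + (l.length : Int) - f + 1)) = [] := by
        apply slice_nil_of_clamp
        rw [clampIdx_eval, clampIdx_eval]
        split_ifs <;> omega
      rw [hsl]
      have hrange : PySem.List.pyRange 0 (l.length : Int) 1 = [] := by
        rw [hn0]; decide
      split_ifs
      · decide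
      · rw [hrange]; rfl
    · have hn1 : 1 ≤ l.length := Nat.pos_of_ne_zero hn0
      obtain ⟨hi0, hin, hmax⟩ := loopA_max l (((l.length : Int) - 1).toNat) 0 1 rfl (le_refl 0)
        one_pos (by exact_mod_cast hn1) (fun t ht _ => by omega)
      rw [← hist] at hi0 hin hmax
      set L : Int := (l.length : Int) - f + 1 with hLdef
      by_cases hL : L ≤ 0
      · rw [if_pos hL]
        have hsl : PySem.List.slice l (some ist) (some (ist + (l.length : Int) - f + 1)) = [] := by
          apply slice_nil_of_clamp
          rw [clampIdx_eval, clampIdx_eval]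
          by_cases hbneg : ist + (l.length : Int) - f + 1 < 0
          · by_cases hf2n : f ≤ 2 * (l.length : Int)
            · exfalso
              apply hD
              simp only [D_solve, ← hl]
              refine ⟨hn1, by omega, hf2n, ist.toNat, by omega, by omega, ?_⟩
              intro u hu
              exact (ltL_false_iff_le _ _).mp (hmax u hu)
            · split_ifs <;> omega
          · split_ifs <;> omega
        rw [hsl]
      · rw [if_neg hL]
        have hL1 : 1 ≤ L := by omega
        obtain ⟨hmem, hge0, hall⟩ :=
          foldl_best (fun i => PySem.List.slice l (some i) (some (i + L)))
            (PySem.List.pyRange 0 (l.length : Int) 1) []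
        have hwin : ∀ tI : Int, 0 ≤ tI → tI < (l.length : Int) →
            pyStrLt (PySem.List.slice l (some ist) (some (ist + L)))
              (PySem.List.slice l (some tI) (some (tI + L))) = false := by
          intro tI h1 h2
          rw [PySem.List.slice_toNat l hi0 (by omega), PySem.List.slice_toNat l h1 (by omega)]
          have e1 : (ist + L).toNat - ist.toNat = L.toNat := by omega
          have e2 : (tI + L).toNat - tI.toNat = L.toNat := by omega
          rw [e1, e2]
          cases hcon : pyStrLt (List.take L.toNat (List.drop ist.toNat l))
              (List.take L.toNat (List.drop tI.toNat l)) with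
          | false => rfl
          | true =>
            exfalso
            have hlt := ltL_take L.toNat _ _ hcon
            rw [hmax tI.toNat (by omega)] at hlt
            exact absurd hlt (by simp)
        have hB : (PySem.List.pyRange 0 (l.length : Int) 1).foldl
            (fun best i => if pyStrLt best (PySem.List.slice l (some i) (some (i + L))) = true
              then PySem.List.slice l (some i) (some (i + L)) else best) [] =
            PySem.List.slice l (some ist) (some (ist + L)) := by
          have h1 := hall ist (PySem.List.mem_pyRange_one.mpr ⟨hi0, hin⟩)
          have h2 : pyStrLt (PySem.List.slice l (some ist) (some (ist + L)))
              ((PySem.List.pyRange 0 (l.length : Int) 1).foldl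
                (fun best i => if pyStrLt best (PySem.List.slice l (some i) (some (i + L))) = true
                  then PySem.List.slice l (some i) (some (i + L)) else best) []) = false := by
            rcases hmem with h | ⟨t, htmem, h⟩
            · rw [h]; exact ltL_nil _
            · rw [h]
              obtain ⟨ht1, ht2⟩ := PySem.List.mem_pyRange_one.mp htmem
              exact hwin t ht1 ht2
          rcases ltL_eq_or_gt h1 with he | hgt
          · exact he
          · rw [hgt] at h2; exact absurd h2 (by simp)
        have harg : ist + (l.length : Int) - f + 1 = ist + L := by omega
        rw [harg, hB]


-- ===== VERDICT (by name: the statement is the Claim_ definition above) =====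
theorem solve_spec : Claim_unchanged_solve := by
  intro s f _ hD
  exact solve_eq s f hD
theorem solve_changed : Claim_changed_solve := by
  unfold Claim_changed_solve
  refine ⟨by decide, by decide, ?_, by decide, by decide⟩
  show solve "ba" 4 = "b"
  have h1 : lceA "ba".toList (2 : Int) 0 1 0 = 0 := by
    rw [lceA, dif_neg (by decide)]
  have h2 : loopA "ba".toList (2 : Int) 0 1 = 0 := by
    rw [loopA, dif_pos (by decide : (1 : Int) < (2 : Int))]
    simp only [h1]
    rw [if_neg (by decide), loopA, dif_neg (by decide)]
  simp only [solve, show ((4 : Int) == 1) = false from by decide, Bool.false_eq_true,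
    if_false, show PySem.Str.len "ba" = (2 : Int) from by decide, h2]
  decide
theorem solve_tight : Claim_exact_solve := by
  intro s f _ hD
  obtain ⟨hn1, hf2, hf2n, t, ht, htlt, hdomi⟩ := hD
  have hnI : (1 : Int) ≤ (s.toList.length : Int) := by exact_mod_cast hn1
  have hf1 : f ≠ 1 := by omega
  have hf : (f == 1) = false := beq_eq_false_iff_ne.mpr hf1
  obtain ⟨hi0, hin, hmax⟩ := loopA_max s.toList (((s.toList.length : Int) - 1).toNat) 0 1 rfl
    (le_refl 0) one_pos (by exact_mod_cast hn1) (fun t' ht' _ => by omega)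
  have h1 : s.toList.drop t ≤ s.toList.drop (loopA s.toList (s.toList.length : Int) 0 1).toNat :=
    (ltL_false_iff_le _ _).mp (hmax t ht)
  have h2 : s.toList.drop (loopA s.toList (s.toList.length : Int) 0 1).toNat ≤ s.toList.drop t :=
    hdomi (loopA s.toList (s.toList.length : Int) 0 1).toNat (by omega)
  have hdt := le_antisymm h2 h1
  have hlen := congrArg List.length hdt
  rw [List.length_drop, List.length_drop] at hlen
  have htist : (t : Int) = loopA s.toList (s.toList.length : Int) 0 1 := by omega
  intro hcon
  have hBval : solve_alt s f = "" := by
    simp only [solve_alt, hf, Bool.false_eq_true, if_false, PySem.Str.len_eq]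
    rw [if_pos (by omega : (s.toList.length : Int) - f + 1 ≤ 0)]
  rw [hBval] at hcon
  simp only [solve, hf, Bool.false_eq_true, if_false, PySem.Str.len_eq, PySem.Str.slice,
    PySem.Chars.slice] at hcon
  have hlist := congrArg String.toList hcon
  simp only [String.toList_ofList, show "".toList = [] from by decide] at hlist
  have hlen2 := congrArg List.length hlist
  rw [PySem.List.length_slice, clampIdx_eval, clampIdx_eval] at hlen2
  simp only [List.length_nil] at hlen2
  revert hlen2
  split_ifs <;> omega
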